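-- pv_equiv track=rewrite | github.com/brucelyu/tensornetworkrg | u1ten.py | indArr2SymCharge
-- ===== SOURCE A (Python) =====
-- def indArr2SymCharge(legdim, qdim, arrind):
--     """
--     Convert a array index to its charge
--
--     Example: Suppose we have
--         legdim = [n0, n1, n2], qdim = [0, 1, 2];
--         if arrind is in [0, n0), resturn 0;
--         if arrind is in [n0, n0 + n1), return 1;
--         if arrind is in [n0+n1, n0+n1+n2), return 2;
--         else return None
--
--         Notice the order in qdim doesn't mater
--         since they will be sorted anyway.
--     """
--     startNum = 0
--     res = None
--     qdimSort = sorted(qdim)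
--     for nk, k in zip(legdim, qdimSort):
--         endNum = startNum + nk
--         if (arrind >= startNum) and (arrind < endNum):
--             res = k
--         startNum = endNum
--     return res
-- ===== SOURCE B (Python) =====
-- def indArr2SymCharge(legdim, qdim, arrind):
--     qdimSort = sorted(qdim)
--     n = min(len(legdim), len(qdimSort))
--     bounds = [0]
--     for d in legdim[:n]:
--         bounds.append(bounds[-1] + d)
--     for i in range(n - 1, -1, -1):
--         if bounds[i] <= arrind < bounds[i + 1]:
--             return qdimSort[i]
--     return None
-- ===== Notes on version B (the rewrite author's own statement) =====
-- stated objective: alternative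
-- what changed: Replaces the single forward scan that keeps a running start offset and overwrites the result on every match by a two-phase table method: first build the cumulative boundary table of the buckets, then walk the buckets back-to-front and return early at the first (i.e. last) matching bucket.
import Mathlib
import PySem

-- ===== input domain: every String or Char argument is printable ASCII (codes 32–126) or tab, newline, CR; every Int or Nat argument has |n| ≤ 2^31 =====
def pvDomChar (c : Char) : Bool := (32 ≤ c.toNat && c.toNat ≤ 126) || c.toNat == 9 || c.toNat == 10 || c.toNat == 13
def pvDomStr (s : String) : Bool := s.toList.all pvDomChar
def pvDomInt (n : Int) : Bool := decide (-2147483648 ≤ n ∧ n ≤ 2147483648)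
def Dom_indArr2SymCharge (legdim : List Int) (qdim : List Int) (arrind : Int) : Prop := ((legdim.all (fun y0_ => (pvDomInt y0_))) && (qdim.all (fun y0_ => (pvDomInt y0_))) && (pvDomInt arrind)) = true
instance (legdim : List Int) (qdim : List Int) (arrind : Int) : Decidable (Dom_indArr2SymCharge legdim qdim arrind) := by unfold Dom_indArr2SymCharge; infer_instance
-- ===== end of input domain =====

-- B replaces A's single forward scan with a running offset and result overwriting by a two-phase
-- method: build the cumulative boundary table once, then walk the buckets back-to-front returning
-- at the first match (objective: alternative algorithm of the same cost).


-- ===== PORT A =====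
-- A: one forward pass over zip(legdim, sorted(qdim)) carrying (startNum, res); res is
-- overwritten whenever arrind falls in [startNum, startNum+nk).
def indArr2SymCharge (legdim : List Int) (qdim : List Int) (arrind : Int) : Option Int :=
  let qdimSort := PySem.List.sorted qdim (fun x => x) false
  ((legdim.zip qdimSort).foldl
    (fun (st : Int × Option Int) p =>
      let endNum := st.1 + p.1
      (endNum, if st.1 ≤ arrind ∧ arrind < endNum then some p.2 else st.2))
    (0, none)).2

-- ===== PORT B =====
-- bounds = [0]; for d in legdim[:n]: bounds.append(bounds[-1] + d)
def pvBuildBounds (acc : Int) : List Int → List Int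
  | [] => []
  | d :: ds => (acc + d) :: pvBuildBounds (acc + d) ds

-- for i in range(n-1, -1, -1): if bounds[i] <= arrind < bounds[i+1]: return qdimSort[i]
-- (fuel = i+1; all indices are in range in Source B, so getD is the exact index read)
def pvLoopB (bounds qs : List Int) (arrind : Int) : Nat → Option Int
  | 0 => none
  | i + 1 =>
      if bounds.getD i 0 ≤ arrind ∧ arrind < bounds.getD (i + 1) 0 then some (qs.getD i 0)
      else pvLoopB bounds qs arrind i

def indArr2SymCharge_alt (legdim : List Int) (qdim : List Int) (arrind : Int) : Option Int :=
  let qdimSort := PySem.List.sorted qdim (fun x => x) false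
  let n := min legdim.length qdimSort.length
  let bounds := 0 :: pvBuildBounds 0 (legdim.take n)
  pvLoopB bounds qdimSort arrind n

-- ===== PRECONDITION & SPEC =====
def Spec_indArr2SymCharge (legdim : List Int) (qdim : List Int) (arrind : Int) (out : Option Int) : Prop := out = indArr2SymCharge_alt legdim qdim arrind
instance (legdim : List Int) (qdim : List Int) (arrind : Int) (out : Option Int) : Decidable (Spec_indArr2SymCharge legdim qdim arrind out) := by unfold Spec_indArr2SymCharge; infer_instance

-- ===== CLAIM (what is proved, stated in full; the proofs are below) =====
def Claim_equal_indArr2SymCharge : Prop := ∀ (legdim : List Int) (qdim : List Int) (arrind : Int), Dom_indArr2SymCharge legdim qdim arrind → Spec_indArr2SymCharge legdim qdim arrind (indArr2SymCharge legdim qdim arrind)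

-- ===== LEMMAS AND PROOFS =====
theorem pvBuildBounds_append (acc : Int) (xs : List Int) (d : Int) :
    pvBuildBounds acc (xs ++ [d]) = pvBuildBounds acc xs ++ [acc + xs.sum + d] := by
  induction xs generalizing acc with
  | nil => simp [pvBuildBounds]
  | cons x xs ih => simp [pvBuildBounds, ih (acc + x)]; ring_nf

theorem pvBuildBounds_length (acc : Int) (xs : List Int) :
    (pvBuildBounds acc xs).length = xs.length := by
  induction xs generalizing acc with
  | nil => rfl
  | cons x xs ih => simp [pvBuildBounds, ih]

theorem pvBounds_getD_last (xs : List Int) :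
    (0 :: pvBuildBounds 0 xs).getD xs.length 0 = xs.sum := by
  induction xs using List.reverseRecOn with
  | nil => rfl
  | append_singleton xs d ih =>
      rw [pvBuildBounds_append]
      simp [List.getD, pvBuildBounds_length]

theorem pvLoopB_congr (arrind : Int) (fuel : Nat) (b1 b2 qs : List Int)
    (h : ∀ i ≤ fuel, b1.getD i 0 = b2.getD i 0) :
    pvLoopB b1 qs arrind fuel = pvLoopB b2 qs arrind fuel := by
  induction fuel with
  | zero => rfl
  | succ n ih =>
      simp only [pvLoopB, h n (by omega), h (n + 1) (by omega)]
      rw [ih (fun i hi => h i (by omega))]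

theorem pvFoldA_fst (arrind : Int) (l : List (Int × Int)) (s : Int) (r : Option Int) :
    (l.foldl (fun (st : Int × Option Int) p =>
        (st.1 + p.1, if st.1 ≤ arrind ∧ arrind < st.1 + p.1 then some p.2 else st.2)) (s, r)).1
      = s + (l.map Prod.fst).sum := by
  induction l generalizing s r with
  | nil => simp
  | cons p l ih => simp [ih]; ring

-- the heart: B's backward early-return loop over the boundary table computes exactly
-- A's "last matching bucket" overwrite fold
theorem pvMain (arrind : Int) (l : List (Int × Int)) (qs : List Int)
    (hq : ∀ i, i < l.length → qs.getD i 0 = (l.getD i (0, 0)).2) :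
    pvLoopB (0 :: pvBuildBounds 0 (l.map Prod.fst)) qs arrind l.length
      = (l.foldl (fun (st : Int × Option Int) p =>
          (st.1 + p.1, if st.1 ≤ arrind ∧ arrind < st.1 + p.1 then some p.2 else st.2))
          (0, none)).2 := by
  induction l using List.reverseRecOn with
  | nil => rfl
  | append_singleton l p ih =>
      have hlen : (l ++ [p]).length = l.length + 1 := by simp
      rw [hlen]
      have hS : ((l ++ [p]).map Prod.fst) = l.map Prod.fst ++ [p.1] := by simp
      rw [hS, pvBuildBounds_append]
      have hb1 : ((0 : Int) :: (pvBuildBounds 0 (l.map Prod.fst) ++ [0 + (l.map Prod.fst).sum + p.1]))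
          = (0 :: pvBuildBounds 0 (l.map Prod.fst)) ++ [0 + (l.map Prod.fst).sum + p.1] := by simp
      rw [hb1]
      have hlenb : ((0 : Int) :: pvBuildBounds 0 (l.map Prod.fst)).length = l.length + 1 := by
        simp [pvBuildBounds_length]
      -- unfold one step of the backward loop
      simp only [pvLoopB]
      have hgm : (((0 : Int) :: pvBuildBounds 0 (l.map Prod.fst)) ++ [0 + (l.map Prod.fst).sum + p.1]).getD l.length 0
          = (l.map Prod.fst).sum := by
        rw [List.getD, List.getElem?_append_left (by omega)]
        have := pvBounds_getD_last (l.map Prod.fst)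
        simpa [List.getD, List.length_map] using this
      have hgm1 : (((0 : Int) :: pvBuildBounds 0 (l.map Prod.fst)) ++ [0 + (l.map Prod.fst).sum + p.1]).getD (l.length + 1) 0
          = (l.map Prod.fst).sum + p.1 := by
        rw [List.getD, List.getElem?_append_right (by omega)]
        simp [hlenb]
      have hq' : qs.getD l.length 0 = p.2 := by
        have h0 := hq l.length (by simp)
        simpa [List.getD, List.getElem?_append_right (Nat.le_refl l.length)] using h0
      rw [hgm, hgm1, hq']
      -- RHS: peel the last fold step
      rw [List.foldl_append]
      simp only [List.foldl_cons, List.foldl_nil]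
      rw [pvFoldA_fst]
      simp only [zero_add]
      by_cases hc : (l.map Prod.fst).sum <= arrind ∧ arrind < (l.map Prod.fst).sum + p.1
      · rw [if_pos hc, if_pos hc]
      · rw [if_neg hc, if_neg hc]
        rw [pvLoopB_congr arrind l.length _ (0 :: pvBuildBounds 0 (l.map Prod.fst)) qs
            (fun i hi => by
              rw [List.getD, List.getElem?_append_left
                (show i < ((0 : Int) :: pvBuildBounds 0 (l.map Prod.fst)).length by omega)]
              rfl)]
        exact ih (fun i hi => by
          have h0 := hq i (by simp; omega)
          simpa [List.getD, List.getElem?_append_left (show i < l.length from hi)] using h0)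

theorem pv_map_fst_zip (legs qs : List Int) :
    ((legs.zip qs).map Prod.fst) = legs.take (min legs.length qs.length) := by
  induction legs generalizing qs with
  | nil => simp
  | cons x xs ih =>
      cases qs with
      | nil => simp
      | cons y ys => simp [ih, Nat.succ_min_succ]

theorem pv_snd_zip (legs qs : List Int) (i : Nat) (hi : i < (legs.zip qs).length) :
    qs.getD i 0 = ((legs.zip qs).getD i (0, 0)).2 := by
  have hi' : i < legs.length ∧ i < qs.length := by
    simp only [List.length_zip, lt_min_iff] at hi; exact hi
  rw [List.getD, List.getD, List.getElem?_eq_getElem hi, List.getElem?_eq_getElem hi'.2]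
  simp [List.getElem_zip]

-- ===== VERDICT (by name: the statement is the Claim_ definition above) =====
theorem indArr2SymCharge_spec : Claim_equal_indArr2SymCharge := by
  intro legdim qdim arrind _
  unfold Spec_indArr2SymCharge indArr2SymCharge indArr2SymCharge_alt
  have h := pvMain arrind (legdim.zip (PySem.List.sorted qdim (fun x => x) false))
      (PySem.List.sorted qdim (fun x => x) false)
      (pv_snd_zip legdim (PySem.List.sorted qdim (fun x => x) false))
  rw [pv_map_fst_zip, List.length_zip] at h
  exact h.symm
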